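-- pv_equiv track=rewrite | github.com/ericho1995/Thirteen | ui.py | get_leader
-- ===== SOURCE A (Python) =====
-- def get_leader(win_counts: dict):
--     if not win_counts:
--         return None
--     top_score = max(win_counts.values())
--     if top_score <= 0:
--         return None
--     leaders = [name for name, score in win_counts.items() if score == top_score]
--     if len(leaders) != 1:
--         return None
--     return leaders[0], top_score
-- ===== SOURCE B (Python) =====
-- def get_leader(win_counts: dict):
--     best = None
--     best_name = None
--     count = 0
--     for name, score in win_counts.items():
--         if best is None or score > best:
--             best = score
--             best_name = name
--             count = 1
--         elif score == best:
--             count += 1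
--     if best is None or best <= 0 or count != 1:
--         return None
--     return best_name, best
-- ===== Notes on version B (the rewrite author's own statement) =====
-- stated objective: alternative
-- what changed: Replaces A's max-over-values pass plus a second filter pass building a leaders list with a single accumulator loop that maintains the running best score, the first name achieving it, and a tie counter.
import Mathlib
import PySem

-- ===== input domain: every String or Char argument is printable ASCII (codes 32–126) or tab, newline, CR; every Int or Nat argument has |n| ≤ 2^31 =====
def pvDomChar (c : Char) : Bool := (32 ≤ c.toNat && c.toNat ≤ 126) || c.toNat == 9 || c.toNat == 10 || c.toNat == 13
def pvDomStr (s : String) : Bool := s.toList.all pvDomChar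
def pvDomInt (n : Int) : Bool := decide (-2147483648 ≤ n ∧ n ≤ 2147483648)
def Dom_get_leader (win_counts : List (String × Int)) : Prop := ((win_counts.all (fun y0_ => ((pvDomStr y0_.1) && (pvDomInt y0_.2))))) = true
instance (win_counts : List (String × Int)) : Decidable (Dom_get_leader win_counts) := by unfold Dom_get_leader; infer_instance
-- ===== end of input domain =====

-- B replaces A's max-then-filter two-pass structure with a single accumulator pass
-- keeping the running best score, its first name, and a tie counter (alternative decomposition).


-- ===== PORT A =====
def get_leader (win_counts : List (String × Int)) : Option (String × Int) :=
  if win_counts = [] then none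
  else
    match PySem.List.max? (win_counts.map Prod.snd) (fun y => y) with
    | none => none   -- unreachable: the list is nonempty
    | some top_score =>
      if top_score ≤ 0 then none
      else
        let leaders := (win_counts.filter (fun p => p.2 == top_score)).map Prod.fst
        if leaders.length ≠ 1 then none
        else
          match PySem.List.pyGet? leaders 0 with
          | none => none   -- unreachable: length = 1
          | some l => some (l, top_score)

-- ===== PORT B =====
-- one loop step of Source B: state = (best, best_name, count)
def glStep (st : Option Int × String × Int) (p : String × Int) : Option Int × String × Int :=
  match st with
  | (none, _, _) => (some p.2, p.1, 1)
  | (some b, nm, c) =>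
    if p.2 > b then (some p.2, p.1, 1)
    else if p.2 == b then (some b, nm, c + 1)
    else (some b, nm, c)

def get_leader_alt (win_counts : List (String × Int)) : Option (String × Int) :=
  match win_counts.foldl glStep (none, "", 0) with
  | (none, _, _) => none
  | (some b, nm, c) => if b ≤ 0 ∨ c ≠ 1 then none else some (nm, b)

-- ===== PRECONDITION & SPEC =====
def Spec_get_leader (win_counts : List (String × Int)) (out : Option (String × Int)) : Prop := out = get_leader_alt win_counts
instance (win_counts : List (String × Int)) (out : Option (String × Int)) : Decidable (Spec_get_leader win_counts out) := by unfold Spec_get_leader; infer_instance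

-- ===== CLAIM (what is proved, stated in full; the proofs are below) =====
def Claim_equal_get_leader : Prop := ∀ (win_counts : List (String × Int)), Dom_get_leader win_counts → Spec_get_leader win_counts (get_leader win_counts)

-- ===== LEMMAS AND PROOFS =====

-- when the running max is not the seed it is attained in the list, so the filter is nonempty
theorem gl_filter_ne_nil (t : List (String × Int)) (s : Int)
    (h : (t.map Prod.snd).foldl max s ≠ s) :
    t.filter (fun p => p.2 == (t.map Prod.snd).foldl max s) ≠ [] := by
  rcases PySem.List.foldl_max_mem (t.map Prod.snd) s with hm | hm
  · exact absurd hm h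
  · rcases List.mem_map.mp hm with ⟨p, hp, hps⟩
    intro hnil
    have := List.filter_eq_nil_iff.mp hnil p hp
    simp [hps] at this

-- invariant of B's loop, starting from a seeded state (some b, nm, c):
-- the best becomes the running max, the name is the first one attaining it (the seed if kept),
-- and the count counts the occurrences of the max (seeded with c when the seed attains it).
theorem glStep_foldl (xs : List (String × Int)) (b : Int) (nm : String) (c : Int) :
    xs.foldl glStep (some b, nm, c) =
      (some ((xs.map Prod.snd).foldl max b),
       (if (xs.map Prod.snd).foldl max b = b then nm
        else (((xs.filter (fun p => p.2 == (xs.map Prod.snd).foldl max b)).map Prod.fst).headD nm)),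
       (if (xs.map Prod.snd).foldl max b = b then c else 0) +
         (xs.countP (fun p => p.2 == (xs.map Prod.snd).foldl max b))) := by
  induction xs generalizing b nm c with
  | nil => simp
  | cons x t ih =>
    have hle := (PySem.List.le_foldl_max (t.map Prod.snd) x.2).1
    have hleb := (PySem.List.le_foldl_max (t.map Prod.snd) b).1
    simp only [List.foldl_cons, List.map_cons, glStep]
    by_cases hgt : x.2 > b
    · rw [if_pos hgt, ih x.2 x.1 1]
      simp only [max_eq_right (le_of_lt hgt)]
      have hMb : (t.map Prod.snd).foldl max x.2 ≠ b := by omega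
      rw [if_neg hMb, if_neg hMb]
      by_cases hx : (t.map Prod.snd).foldl max x.2 = x.2
      · have hp : (x.2 == (t.map Prod.snd).foldl max x.2) = true := by simp [hx]
        simp only [if_pos hx, List.filter_cons, List.countP_cons, hp, if_true,
          List.map_cons, List.headD_cons]
        refine Prod.ext rfl (Prod.ext rfl ?_)
        push_cast; ring
      · have hp : (x.2 == (t.map Prod.snd).foldl max x.2) = false := by
          simp only [beq_eq_false_iff_ne, ne_eq]
          exact fun h => hx h.symm
        simp only [if_neg hx, List.filter_cons, List.countP_cons, hp,
          Bool.false_eq_true, if_false, add_zero]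
        refine Prod.ext rfl (Prod.ext ?_ rfl)
        -- headD defaults differ but the filtered list is nonempty
        rcases List.exists_cons_of_ne_nil (gl_filter_ne_nil t x.2 hx) with ⟨y, l, hyl⟩
        rw [hyl]
        simp
    · rw [if_neg hgt]
      have hb2 : max b x.2 = b := by omega
      by_cases heq : (x.2 == b) = true
      · have hxb : x.2 = b := by simpa using heq
        rw [if_pos heq, ih b nm (c + 1)]
        simp only [hb2]
        by_cases hM : (t.map Prod.snd).foldl max b = b
        · have hp : (x.2 == (t.map Prod.snd).foldl max b) = true := by simp [hxb, hM]
          simp only [if_pos hM, List.filter_cons, List.countP_cons, hp, if_true]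
          refine Prod.ext rfl (Prod.ext rfl ?_)
          push_cast; ring
        · have hp : (x.2 == (t.map Prod.snd).foldl max b) = false := by
            simp only [beq_eq_false_iff_ne, ne_eq, hxb]
            exact fun h => hM h.symm
          simp only [if_neg hM, List.filter_cons, List.countP_cons, hp,
            Bool.false_eq_true, if_false, add_zero]
      · have hxb : x.2 ≠ b := by simpa using heq
        rw [if_neg heq, ih b nm c]
        simp only [hb2]
        have hp : (x.2 == (t.map Prod.snd).foldl max b) = false := by
          simp only [beq_eq_false_iff_ne, ne_eq]
          omega
        simp only [List.filter_cons, List.countP_cons, hp,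
          Bool.false_eq_true, if_false, add_zero]

-- ===== VERDICT (by name: the statement is the Claim_ definition above) =====
theorem get_leader_spec : Claim_equal_get_leader := by
  unfold Claim_equal_get_leader
  intro xs _
  unfold Spec_get_leader
  match xs with
  | [] => rfl
  | (n, s) :: t =>
    unfold get_leader get_leader_alt
    rw [if_neg (List.cons_ne_nil _ _), List.map_cons, PySem.List.max?_id_cons]
    simp only [List.foldl_cons, glStep]
    rw [glStep_foldl t s n 1]
    simp only []
    by_cases hpos : (t.map Prod.snd).foldl max s ≤ 0
    · rw [if_pos hpos, if_pos (Or.inl hpos)]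
    · rw [if_neg hpos]
      have hcnt := List.countP_eq_length_filter (l := t) (p := fun p => p.2 == (t.map Prod.snd).foldl max s)
      by_cases hsM : (t.map Prod.snd).foldl max s = s
      · -- the head attains the max
        have hp : ((n, s).2 == (t.map Prod.snd).foldl max s) = true := by simp [hsM]
        simp only [if_pos hsM, List.filter_cons, hp, if_true, List.map_cons]
        by_cases hc0 : t.countP (fun p => p.2 == (t.map Prod.snd).foldl max s) = 0
        · have hfil : t.filter (fun p => p.2 == (t.map Prod.snd).foldl max s) = [] := by
            rw [← List.length_eq_zero_iff, ← hcnt, hc0]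
          rw [hfil]
          simp [PySem.List.pyGet?, PySem.List.pyIdx?, hc0, hpos]
        · have hlen : (n :: (t.filter (fun p => p.2 == (t.map Prod.snd).foldl max s)).map Prod.fst).length ≠ 1 := by
            simp only [List.length_cons, List.length_map, ← hcnt]
            omega
          rw [if_pos hlen, if_pos (Or.inr (by push_cast; omega))]
      · -- the head does not attain the max
        have hp : ((n, s).2 == (t.map Prod.snd).foldl max s) = false := by
          simp only [beq_eq_false_iff_ne, ne_eq]
          exact fun h => hsM h.symm
        simp only [if_neg hsM, List.filter_cons, hp, Bool.false_eq_true, if_false, zero_add]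
        by_cases hc1 : t.countP (fun p => p.2 == (t.map Prod.snd).foldl max s) = 1
        · have hf1 : (t.filter (fun p => p.2 == (t.map Prod.snd).foldl max s)).length = 1 := by
            rw [← hcnt, hc1]
          rcases List.length_eq_one_iff.mp hf1 with ⟨p, hpl⟩
          rw [hpl]
          simp [PySem.List.pyGet?, PySem.List.pyIdx?, hc1, hpos]
        · have hlen : ((t.filter (fun p => p.2 == (t.map Prod.snd).foldl max s)).map Prod.fst).length ≠ 1 := by
            simp only [List.length_map, ← hcnt]
            omega
          rw [if_pos hlen, if_pos (Or.inr (by push_cast; omega))]
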